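-- pv_equiv track=rewrite | github.com/HerrBaum-YR/HCL-AL | md_clip3d/inference/clip_inference_utils.py | remove_zero_prob_location
-- ===== SOURCE A (Python) =====
-- def remove_zero_prob_location(locations, probs, related_lists=None):
--    target_indices = [idx for idx, prob in enumerate(probs) if prob != 0]
--    probs = [probs[idx] for idx in target_indices]
--    locations = [locations[idx] for idx in target_indices]
--    if related_lists:
--        new_lists = []
--        for related_list in related_lists:
--            new_lists.append([related_list[idx] for idx in target_indices])
--        related_lists = new_lists
--    return locations, probs, related_lists
-- ===== SOURCE B (Python) =====
-- def remove_zero_prob_location(locations, probs, related_lists=None):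
--     new_locations = []
--     new_probs = []
--     if related_lists:
--         new_lists = [[] for _ in related_lists]
--         for idx, prob in enumerate(probs):
--             if prob != 0:
--                 new_locations.append(locations[idx])
--                 new_probs.append(prob)
--                 for acc, related_list in zip(new_lists, related_lists):
--                     acc.append(related_list[idx])
--         return new_locations, new_probs, new_lists
--     for idx, prob in enumerate(probs):
--         if prob != 0:
--             new_locations.append(locations[idx])
--             new_probs.append(prob)
--     return new_locations, new_probs, related_lists
-- ===== Notes on version B (the rewrite author's own statement) =====
-- stated objective: simpler
-- what changed: Replaced the intermediate target_indices list and the three index-driven rebuild passes (one comprehension per output list plus a loop over related_lists) by a single pass over enumerate(probs) that appends to all output accumulators at once.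
import Mathlib
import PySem

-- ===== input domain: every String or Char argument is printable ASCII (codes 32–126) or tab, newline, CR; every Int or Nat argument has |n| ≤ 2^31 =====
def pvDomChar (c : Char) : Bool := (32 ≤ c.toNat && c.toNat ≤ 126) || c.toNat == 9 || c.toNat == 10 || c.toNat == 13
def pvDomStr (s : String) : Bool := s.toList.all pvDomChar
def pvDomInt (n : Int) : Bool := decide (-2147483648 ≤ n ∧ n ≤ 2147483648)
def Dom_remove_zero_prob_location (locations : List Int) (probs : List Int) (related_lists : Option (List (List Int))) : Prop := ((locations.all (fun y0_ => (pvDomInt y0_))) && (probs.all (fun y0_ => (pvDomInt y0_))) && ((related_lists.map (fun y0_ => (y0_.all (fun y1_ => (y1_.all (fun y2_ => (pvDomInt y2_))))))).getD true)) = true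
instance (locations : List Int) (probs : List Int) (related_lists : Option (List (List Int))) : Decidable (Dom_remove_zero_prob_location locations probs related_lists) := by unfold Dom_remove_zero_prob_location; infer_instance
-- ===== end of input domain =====

-- B replaces A's index list + three index-driven rebuild passes by one pass over
-- enumerate(probs) appending to all accumulators at once (objective: simpler).

-- ===== PORT A =====
-- target_indices = [idx for idx, prob in enumerate(probs) if prob != 0]; then one
-- comprehension per output list indexing with pyGetD (in range under Pre_).
def remove_zero_prob_location (locations : List Int) (probs : List Int) (related_lists : Option (List (List Int))) : List Int × List Int × Option (List (List Int)) :=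
  let target_indices := ((PySem.List.enumerate probs).filter (fun p => p.2 != 0)).map (·.1)
  let probs2 := target_indices.map (fun idx => PySem.List.pyGetD probs idx 0)
  let locations2 := target_indices.map (fun idx => PySem.List.pyGetD locations idx 0)
  match related_lists with
  | none => (locations2, probs2, none)
  | some rls =>
    if rls.isEmpty then (locations2, probs2, some rls)
    else
      let new_lists := rls.map (fun rl => target_indices.map (fun idx => PySem.List.pyGetD rl idx 0))
      (locations2, probs2, some new_lists)

-- ===== PORT B =====
-- single pass over enumerate(probs); with truthy related_lists the state also carries
-- one accumulator per related list, extended via zipWith (Python's zip of new_lists with related_lists).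
def remove_zero_prob_location_alt (locations : List Int) (probs : List Int) (related_lists : Option (List (List Int))) : List Int × List Int × Option (List (List Int)) :=
  match related_lists with
  | some (r :: rs) =>
    let rls := r :: rs
    let st := (PySem.List.enumerate probs).foldl
      (fun st p =>
        if p.2 != 0 then
          (st.1 ++ [PySem.List.pyGetD locations p.1 0], st.2.1 ++ [p.2],
           List.zipWith (fun acc rl => acc ++ [PySem.List.pyGetD rl p.1 0]) st.2.2 rls)
        else st)
      (([] : List Int), ([] : List Int), rls.map (fun _ => ([] : List Int)))
    (st.1, st.2.1, some st.2.2)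
  | _ =>
    let st := (PySem.List.enumerate probs).foldl
      (fun st p =>
        if p.2 != 0 then (st.1 ++ [PySem.List.pyGetD locations p.1 0], st.2 ++ [p.2]) else st)
      (([] : List Int), ([] : List Int))
    (st.1, st.2, related_lists)

-- ===== PRECONDITION & SPEC =====
-- Pre_ excludes exactly the inputs where Python A raises IndexError: some index with a
-- nonzero probability is out of range for locations or for one of the related lists.
def Pre_remove_zero_prob_location (locations : List Int) (probs : List Int) (related_lists : Option (List (List Int))) : Prop :=
  ∀ i, i < probs.length → probs.getD i 0 ≠ 0 →
    i < locations.length ∧ ∀ rl ∈ related_lists.getD [], i < rl.length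
instance (locations : List Int) (probs : List Int) (related_lists : Option (List (List Int))) : Decidable (Pre_remove_zero_prob_location locations probs related_lists) := by unfold Pre_remove_zero_prob_location; infer_instance

def pvWitness_remove_zero_prob_location : List Int × List Int × Option (List (List Int)) := ([5, 6], [1, 0], some [[7, 8]])

def Spec_remove_zero_prob_location (locations : List Int) (probs : List Int) (related_lists : Option (List (List Int))) (out : List Int × List Int × Option (List (List Int))) : Prop := out = remove_zero_prob_location_alt locations probs related_lists
instance (locations : List Int) (probs : List Int) (related_lists : Option (List (List Int))) (out : List Int × List Int × Option (List (List Int))) : Decidable (Spec_remove_zero_prob_location locations probs related_lists out) := by unfold Spec_remove_zero_prob_location; infer_instance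

-- ===== CLAIM (what is proved, stated in full; the proofs are below) =====
def Claim_equal_remove_zero_prob_location : Prop := ∀ (locations : List Int) (probs : List Int) (related_lists : Option (List (List Int))), Dom_remove_zero_prob_location locations probs related_lists → Pre_remove_zero_prob_location locations probs related_lists → Spec_remove_zero_prob_location locations probs related_lists (remove_zero_prob_location locations probs related_lists)

-- ===== LEMMAS AND PROOFS =====

-- B's two-accumulator fold in closed form
theorem rzp_foldl2 (locations : List Int) (l : List (Int × Int)) (a b : List Int) :
    l.foldl (fun st p =>
        if p.2 != 0 then (st.1 ++ [PySem.List.pyGetD locations p.1 0], st.2 ++ [p.2]) else st)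
      (a, b)
    = (a ++ (l.filter (fun p => p.2 != 0)).map (fun p => PySem.List.pyGetD locations p.1 0),
       b ++ (l.filter (fun p => p.2 != 0)).map (·.2)) := by
  induction l generalizing a b with
  | nil => simp
  | cons hd tl ih =>
    by_cases h : hd.2 = 0
    · have h' : (hd.2 != 0) = false := by simp [h]
      rw [List.foldl_cons, if_neg (by simp [h']), ih]
      simp [h]
    · have h' : (hd.2 != 0) = true := by simp [h]
      rw [List.foldl_cons, if_pos h', ih]
      simp [h]

-- appending nothing via zipWith keeps a no-longer list
theorem rzp_zipWith_nil (c rls : List (List Int)) (h : c.length ≤ rls.length) :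
    List.zipWith (fun ci (_ : List Int) => ci) c rls = c := by
  induction c generalizing rls with
  | nil => simp
  | cons x xs ih =>
    cases rls with
    | nil => simp at h
    | cons r rs => simpa using ih rs (by simpa using h)

-- fusing two zipWith-appends
theorem rzp_zipWith_step (c rls : List (List Int)) (h : List Int → Int) (m : List Int → List Int) :
    List.zipWith (fun ci rl => ci ++ m rl)
      (List.zipWith (fun ci rl => ci ++ [h rl]) c rls) rls
    = List.zipWith (fun ci rl => ci ++ h rl :: m rl) c rls := by
  induction c generalizing rls with
  | nil => simp
  | cons x xs ih =>
    cases rls with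
    | nil => simp
    | cons r rs => simp [ih]

-- B's three-accumulator fold in closed form
theorem rzp_foldl3 (locations : List Int) (rls : List (List Int)) (l : List (Int × Int))
    (a b : List Int) (c : List (List Int)) (hc : c.length ≤ rls.length) :
    l.foldl (fun st p =>
        if p.2 != 0 then
          (st.1 ++ [PySem.List.pyGetD locations p.1 0], st.2.1 ++ [p.2],
           List.zipWith (fun acc rl => acc ++ [PySem.List.pyGetD rl p.1 0]) st.2.2 rls)
        else st)
      (a, b, c)
    = (a ++ (l.filter (fun p => p.2 != 0)).map (fun p => PySem.List.pyGetD locations p.1 0),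
       b ++ (l.filter (fun p => p.2 != 0)).map (·.2),
       List.zipWith (fun ci rl => ci ++ (l.filter (fun p => p.2 != 0)).map (fun p => PySem.List.pyGetD rl p.1 0)) c rls) := by
  induction l generalizing a b c with
  | nil =>
    simp only [List.foldl_nil, List.filter_nil, List.map_nil, List.append_nil]
    exact congrArg (fun z => (a, b, z)) (rzp_zipWith_nil c rls hc).symm
  | cons hd tl ih =>
    by_cases h : hd.2 = 0
    · have h' : (hd.2 != 0) = false := by simp [h]
      rw [List.foldl_cons, if_neg (by simp [h']), ih _ _ _ hc]
      simp [h]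
    · have h' : (hd.2 != 0) = true := by simp [h]
      rw [List.foldl_cons, if_pos h',
        ih _ _ _ (by rw [List.length_zipWith]; omega)]
      simp [rzp_zipWith_step, h]

-- starting from empty accumulators, the zipWith collapses to a map over rls
theorem rzp_zipWith_empty (rls : List (List Int)) (F : List Int → List Int) :
    List.zipWith (fun ci rl => ci ++ F rl) (List.replicate rls.length ([] : List Int)) rls
    = rls.map F := by
  induction rls with
  | nil => simp
  | cons r rs ih => simp [List.replicate_succ, ih]

-- on members of enumerate probs, indexing back into probs returns the paired value
theorem rzp_getD_enumerate (probs : List Int) (p : Int × Int)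
    (hp : p ∈ PySem.List.enumerate probs) :
    PySem.List.pyGetD probs p.1 0 = p.2 := by
  rcases (PySem.List.mem_enumerate_iff probs 0 p).1 hp with ⟨k, hk, rfl⟩
  simp [hk, List.getD_eq_getElem?_getD]

-- ===== VERDICT (by name: the statement is the Claim_ definition above) =====
theorem remove_zero_prob_location_spec : Claim_equal_remove_zero_prob_location := by
  intro locations probs related_lists _ _
  unfold Spec_remove_zero_prob_location remove_zero_prob_location remove_zero_prob_location_alt
  have hprobs : (((PySem.List.enumerate probs).filter (fun p => p.2 != 0)).map (·.1)).map
      (fun idx => PySem.List.pyGetD probs idx 0)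
      = ((PySem.List.enumerate probs).filter (fun p => p.2 != 0)).map (·.2) := by
    rw [List.map_map]
    exact List.map_congr_left (fun p hp =>
      rzp_getD_enumerate probs p (List.mem_of_mem_filter hp))
  match related_lists with
  | none =>
    simp only [rzp_foldl2, List.nil_append]
    simp [hprobs, List.map_map, Function.comp]
  | some [] =>
    simp only [rzp_foldl2, List.nil_append, List.isEmpty_nil, if_pos]
    simp [hprobs, List.map_map, Function.comp]
  | some (r :: rs) =>
    simp only [List.isEmpty_cons, if_neg, Bool.false_eq_true, not_false_iff]
    rw [rzp_foldl3 locations (r :: rs) _ [] [] _ (by simp)]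
    simp [hprobs, rzp_zipWith_empty, List.map_map, Function.comp]
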